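-- pv_equiv track=rewrite | github.com/moduIo/LogicalHMM | utils/Greenberg Parser/parser.py | filter_session_data
-- ===== SOURCE A (Python) =====
-- def filter_session_data(session):
-- 	commands = []       # Sequential list of commands in file
-- 	aliases = []        # Sequential list of aliases in file
-- 	directories = []    # Sequential list of directories in file
--
-- 	# Parse session into sequences
-- 	for line in session:
--
-- 		# Ignore blank lines
-- 		if len(line) > 0:
--
-- 			# Store data into appropriate list without leading ID ('C ', 'A ', 'D ')
-- 			if line[0] == 'C':
-- 				commands.append(line[2:])
--
-- 			elif line[0] == 'A':
-- 				aliases.append(line[2:])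
--
-- 			elif line[0] == 'D':
-- 				directories.append(line[2:])
--
-- 	return commands, aliases, directories
-- ===== SOURCE B (Python) =====
-- def filter_session_data(session):
-- 	commands = [line[2:] for line in session if line and line[0] == 'C']
-- 	aliases = [line[2:] for line in session if line and line[0] == 'A']
-- 	directories = [line[2:] for line in session if line and line[0] == 'D']
-- 	return commands, aliases, directories
-- ===== Notes on version B (the rewrite author's own statement) =====
-- stated objective: idiomatic
-- what changed: Replaces the single accumulating for-loop over three mutable lists with three independent filtering list comprehensions, one scan of the session per category.
import Mathlib
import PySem

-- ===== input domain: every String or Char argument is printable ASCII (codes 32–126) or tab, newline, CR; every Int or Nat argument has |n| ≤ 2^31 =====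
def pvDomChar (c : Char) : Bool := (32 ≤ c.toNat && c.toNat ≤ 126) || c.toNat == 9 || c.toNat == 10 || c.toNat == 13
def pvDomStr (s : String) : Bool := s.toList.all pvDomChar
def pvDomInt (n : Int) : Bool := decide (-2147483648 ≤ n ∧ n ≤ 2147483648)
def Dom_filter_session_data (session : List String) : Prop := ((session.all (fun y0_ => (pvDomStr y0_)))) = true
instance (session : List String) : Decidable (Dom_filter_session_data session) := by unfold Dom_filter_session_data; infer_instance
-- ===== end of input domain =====

-- B replaces A's single categorizing loop with three independent filtering comprehensions (idiomatic; return value identical).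

-- ===== PORT A =====
-- one loop step: classify 'line' and append to the right accumulator
def fsdStep (acc : List String × List String × List String) (line : String) :
    List String × List String × List String :=
  if 0 < PySem.Str.len line then
    if PySem.Str.pyGet? line 0 = some 'C' then
      (acc.1 ++ [PySem.Str.slice line (some 2) none], acc.2.1, acc.2.2)
    else if PySem.Str.pyGet? line 0 = some 'A' then
      (acc.1, acc.2.1 ++ [PySem.Str.slice line (some 2) none], acc.2.2)
    else if PySem.Str.pyGet? line 0 = some 'D' then
      (acc.1, acc.2.1, acc.2.2 ++ [PySem.Str.slice line (some 2) none])
    else acc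
  else acc

def filter_session_data (session : List String) : List String × List String × List String :=
  session.foldl fsdStep ([], [], [])

-- ===== PORT B =====
-- one comprehension: [line[2:] for line in session if line and line[0] == c]
def fsdCat (c : Char) (session : List String) : List String :=
  (session.filter (fun line =>
      decide (0 < PySem.Str.len line) && decide (PySem.Str.pyGet? line 0 = some c))).map
    (fun line => PySem.Str.slice line (some 2) none)

def filter_session_data_alt (session : List String) : List String × List String × List String :=
  (fsdCat 'C' session, fsdCat 'A' session, fsdCat 'D' session)

-- ===== PRECONDITION & SPEC =====
def Spec_filter_session_data (session : List String) (out : List String × List String × List String) : Prop := out = filter_session_data_alt session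
instance (session : List String) (out : List String × List String × List String) : Decidable (Spec_filter_session_data session out) := by unfold Spec_filter_session_data; infer_instance

-- ===== CLAIM (what is proved, stated in full; the proofs are below) =====
def Claim_equal_filter_session_data : Prop := ∀ (session : List String), Dom_filter_session_data session → Spec_filter_session_data session (filter_session_data session)

-- ===== LEMMAS AND PROOFS =====
lemma fsd_fold (session : List String) (cs as ds : List String) :
    session.foldl fsdStep (cs, as, ds) =
      (cs ++ fsdCat 'C' session, as ++ fsdCat 'A' session, ds ++ fsdCat 'D' session) := by
  induction session generalizing cs as ds with
  | nil => simp [fsdCat]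
  | cons line rest ih =>
    simp only [List.foldl_cons, fsdStep]
    split_ifs <;> simp_all [fsdCat]

-- ===== VERDICT (by name: the statement is the Claim_ definition above) =====
theorem filter_session_data_spec : Claim_equal_filter_session_data := by
  intro session _
  unfold Spec_filter_session_data filter_session_data filter_session_data_alt
  simp [fsd_fold]
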